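-- pv_equiv track=rewrite | github.com/arjnbli/algo-expert | dp/maxProfitsWithKTransactions.py | maxProfitWithKTransactions2
-- ===== SOURCE A (Python) =====
-- def maxProfitWithKTransactions2(prices, k):
--     # Write your code here.
--     if len(prices) == 0 or k == 0:
--         return 0
--     previous = [0 for price in prices]
--     for i in range(k):
--         dp = [0 for price in prices]
--         prevMax = float('-inf')
--         for j in range(1, len(prices)):
--             prevMax = max(prevMax, previous[j - 1] - prices[j - 1])
--             dp[j] = max(
--                 dp[j - 1],
--                 previous[j],
--                 prices[j] + prevMax
--             )
--         previous = dp
--     return dp[-1]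
-- ===== SOURCE B (Python) =====
-- def maxProfitWithKTransactions2(prices, k):
--     # Buy/sell state-machine DP: one pass over prices, transactions inner.
--     buy = [float('-inf')] * (k + 1)
--     sell = [0] * (k + 1)
--     for price in prices:
--         for t in range(1, k + 1):
--             buy[t] = max(buy[t], sell[t - 1] - price)
--             sell[t] = max(sell[t], buy[t] + price)
--     return sell[k]
-- ===== Notes on version B (the rewrite author's own statement) =====
-- stated objective: idiomatic
-- what changed: Replaces the row-by-row tableau DP (outer loop over transactions, inner over prices, with a previous/dp pair and a running prevMax) by the standard buy/sell state-machine DP: a single outer pass over prices maintaining buy[t]/sell[t] arrays with the transaction loop inside.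
-- outside the precondition, e.g. on maxProfitWithKTransactions2([], -1): A returns 0, B raises IndexError
import Mathlib
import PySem

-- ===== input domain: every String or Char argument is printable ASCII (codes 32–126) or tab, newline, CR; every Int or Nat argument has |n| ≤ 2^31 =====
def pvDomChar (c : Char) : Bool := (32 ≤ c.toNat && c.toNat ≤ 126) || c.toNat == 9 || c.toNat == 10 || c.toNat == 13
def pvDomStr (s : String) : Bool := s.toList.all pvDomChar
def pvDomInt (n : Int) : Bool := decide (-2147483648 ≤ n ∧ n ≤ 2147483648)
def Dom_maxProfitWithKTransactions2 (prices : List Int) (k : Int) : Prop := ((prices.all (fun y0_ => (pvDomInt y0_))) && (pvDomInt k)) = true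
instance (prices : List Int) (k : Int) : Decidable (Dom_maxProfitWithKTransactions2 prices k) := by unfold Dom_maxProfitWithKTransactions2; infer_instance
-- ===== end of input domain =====

-- B replaces A's row-by-row tableau DP by the standard one-pass buy/sell state-machine DP
-- (outer loop over prices, transaction loop inside); same O(n*k) cost, more idiomatic.

-- Python's float('-inf') sentinel is modeled as `none`; pvOMax o x = max(o, x) where none = -inf.
-- Exact here: the sentinel is only ever fed to max and immediately replaced by an int.
def pvOMax (o : Option Int) (x : Int) : Int :=
  match o with
  | none => x
  | some a => max a x

-- ===== PORT A =====
-- inner loop of A: `for j in range(1, len(prices))` over state (dp, prevMax);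
-- dp[j] = ... is List.set, reads are getD (indices are always in range).
def pvRowA (prices previous : List Int) : List Int :=
  ((List.range' 1 (prices.length - 1)).foldl
    (fun (st : List Int × Option Int) j =>
      let pm := pvOMax st.2 (previous.getD (j - 1) 0 - prices.getD (j - 1) 0)
      let v := max (max (st.1.getD (j - 1) 0) (previous.getD j 0)) (prices.getD j 0 + pm)
      (st.1.set j v, some pm))
    (prices.map (fun _ => (0 : Int)), none)).1

def maxProfitWithKTransactions2 (prices : List Int) (k : Int) : Int :=
  if prices.length = 0 ∨ k = 0 then 0
  else
    -- `for i in range(k)`: k ≥ 1 here under Pre_ (Python raises UnboundLocalError for k < 0)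
    let final := (List.range k.toNat).foldl (fun previous _ => pvRowA prices previous)
      (prices.map (fun _ => (0 : Int)))
    final.getLastD 0   -- dp[-1] (the last row is nonempty here)

-- ===== PORT B =====
-- one price step of B: `for t in range(1, k + 1)` updating buy/sell in place
def pvStepB (K : Nat) (st : List (Option Int) × List Int) (price : Int) :
    List (Option Int) × List Int :=
  (List.range' 1 K).foldl
    (fun (st : List (Option Int) × List Int) t =>
      let b := pvOMax (st.1.getD t none) (st.2.getD (t - 1) 0 - price)
      let s := max (st.2.getD t 0) (b + price)
      (st.1.set t (some b), st.2.set t s))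
    st

def maxProfitWithKTransactions2_alt (prices : List Int) (k : Int) : Int :=
  let K := k.toNat
  let fin := prices.foldl (pvStepB K) (List.replicate (K + 1) (none : Option Int), List.replicate (K + 1) (0 : Int))
  fin.2.getD K 0

-- ===== PRECONDITION & SPEC =====
-- Pre_ excludes k < 0: there Python A raises UnboundLocalError whenever prices is nonempty
-- (and B raises IndexError); the lone return A still makes (empty prices, k < 0 → 0) is an
-- accident of the guard's evaluation order, and B raises there too.
def Pre_maxProfitWithKTransactions2 (prices : List Int) (k : Int) : Prop := 0 ≤ k
instance (prices : List Int) (k : Int) : Decidable (Pre_maxProfitWithKTransactions2 prices k) := by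
  unfold Pre_maxProfitWithKTransactions2; infer_instance
def pvWitness_maxProfitWithKTransactions2 : List Int × Int := ([3, 1, 4, 1, 5], 2)

def Spec_maxProfitWithKTransactions2 (prices : List Int) (k : Int) (out : Int) : Prop := out = maxProfitWithKTransactions2_alt prices k
instance (prices : List Int) (k : Int) (out : Int) : Decidable (Spec_maxProfitWithKTransactions2 prices k out) := by unfold Spec_maxProfitWithKTransactions2; infer_instance

-- ===== CLAIM (what is proved, stated in full; the proofs are below) =====
def Claim_equal_maxProfitWithKTransactions2 : Prop := ∀ (prices : List Int) (k : Int), Dom_maxProfitWithKTransactions2 prices k → Pre_maxProfitWithKTransactions2 prices k → Spec_maxProfitWithKTransactions2 prices k (maxProfitWithKTransactions2 prices k)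

-- ===== LEMMAS AND PROOFS =====

-- The common mathematical value: pvS ps t m = best profit with ≤ t transactions over the
-- first m prices; pvB ps t m = best "holding" value (none = -inf, no buy possible yet).
mutual
def pvS (ps : List Int) : Nat → Nat → Int
  | _, 0 => 0
  | 0, _ + 1 => 0
  | t + 1, m + 1 =>
      max (pvS ps (t + 1) m)
          (pvOMax (pvB ps (t + 1) m) (pvS ps t (m + 1) - ps.getD m 0) + ps.getD m 0)
def pvB (ps : List Int) : Nat → Nat → Option Int
  | _, 0 => none
  | 0, _ + 1 => none
  | t + 1, m + 1 => some (pvOMax (pvB ps (t + 1) m) (pvS ps t (m + 1) - ps.getD m 0))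
end

@[simp] lemma pvS_zero_left (ps : List Int) (m : Nat) : pvS ps 0 m = 0 := by
  cases m <;> simp [pvS]

@[simp] lemma pvS_zero_right (ps : List Int) (t : Nat) : pvS ps t 0 = 0 := by
  cases t <;> simp [pvS]

@[simp] lemma pvB_zero_left (ps : List Int) (m : Nat) : pvB ps 0 m = none := by
  cases m <;> simp [pvB]

@[simp] lemma pvB_zero_right (ps : List Int) (t : Nat) : pvB ps t 0 = none := by
  cases t <;> simp [pvB]

lemma pvS_one (ps : List Int) (t : Nat) : pvS ps t 1 = 0 := by
  induction t with
  | zero => simp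
  | succ t ih =>
      show pvS ps (t + 1) (0 + 1) = 0
      rw [pvS]
      simp [ih, pvOMax]

-- the max-of-three shape A's inner loop computes, shown equal to pvS's recurrence
lemma pvS_step (ps : List Int) (t c : Nat) (b : Int) (hb : pvB ps (t + 1) (c + 1) = some b) :
    pvS ps (t + 1) (c + 1 + 1) =
      max (max (pvS ps (t + 1) (c + 1)) (pvS ps t (c + 1 + 1))) (ps.getD (c + 1) 0 + b) := by
  rw [pvS, hb]
  simp only [pvOMax]
  omega

lemma set_map_range {β : Type} (n t : Nat) (f : Nat → β) (v : β) :
    ((List.range n).map f).set t v = (List.range n).map (fun i => if i = t then v else f i) := by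
  apply List.ext_getElem
  · simp
  · intro i h1 h2
    simp only [List.getElem_set, List.getElem_map, List.getElem_range]
    rcases eq_or_ne t i with h | h
    · simp [h]
    · simp [h, Ne.symm h]

lemma map_range_congr {β : Type} (n : Nat) (f g : Nat → β) (h : ∀ i, i < n → f i = g i) :
    (List.range n).map f = (List.range n).map g := by
  apply List.map_congr_left
  intro i hi
  exact h i (List.mem_range.mp hi)

-- ==== B side ====

-- column state after the first m prices
def pvColB (ps : List Int) (K m : Nat) : List (Option Int) := (List.range (K + 1)).map (fun t => pvB ps t m)
def pvColS (ps : List Int) (K m : Nat) : List Int := (List.range (K + 1)).map (fun t => pvS ps t m)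

lemma stepB_inner (ps : List Int) (K m : Nat) :
    ∀ d c, c + d = K →
      (List.range' (c + 1) d).foldl
        (fun (st : List (Option Int) × List Int) t =>
          let b := pvOMax (st.1.getD t none) (st.2.getD (t - 1) 0 - ps.getD m 0)
          let s := max (st.2.getD t 0) (b + ps.getD m 0)
          (st.1.set t (some b), st.2.set t s))
        ((List.range (K + 1)).map (fun t => if t ≤ c then pvB ps t (m + 1) else pvB ps t m),
         (List.range (K + 1)).map (fun t => if t ≤ c then pvS ps t (m + 1) else pvS ps t m))
      = (pvColB ps K (m + 1), pvColS ps K (m + 1)) := by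
  intro d
  induction d with
  | zero =>
      intro c hc
      have hc' : K = c := by omega
      subst hc'
      simp only [List.range'_zero, List.foldl_nil, pvColB, pvColS, Prod.mk.injEq]
      constructor <;>
        · apply map_range_congr
          intro i hi
          simp [Nat.lt_succ_iff.mp hi]
  | succ d ih =>
      intro c hc
      rw [List.range'_succ, List.foldl_cons]
      have hcK : c + 1 < K + 1 := by omega
      have hcK' : c < K + 1 := by omega
      have h1 : ((List.range (K + 1)).map (fun t => if t ≤ c then pvS ps t (m + 1) else pvS ps t m)).getD c 0
          = pvS ps c (m + 1) := by
        rw [PySem.List.getD_map_range _ _ _ _ hcK']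
        simp
      have h2 : ((List.range (K + 1)).map (fun t => if t ≤ c then pvB ps t (m + 1) else pvB ps t m)).getD (c + 1) none
          = pvB ps (c + 1) m := by
        rw [PySem.List.getD_map_range _ _ _ _ hcK]
        simp
      have h3 : ((List.range (K + 1)).map (fun t => if t ≤ c then pvS ps t (m + 1) else pvS ps t m)).getD (c + 1) 0
          = pvS ps (c + 1) m := by
        rw [PySem.List.getD_map_range _ _ _ _ hcK]
        simp
      simp only [Nat.add_sub_cancel, h1, h2, h3]
      have hb : some (pvOMax (pvB ps (c + 1) m) (pvS ps c (m + 1) - ps.getD m 0)) = pvB ps (c + 1) (m + 1) := by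
        rw [pvB]
      have hs : max (pvS ps (c + 1) m) (pvOMax (pvB ps (c + 1) m) (pvS ps c (m + 1) - ps.getD m 0) + ps.getD m 0)
          = pvS ps (c + 1) (m + 1) := by
        rw [pvS]
      rw [set_map_range, set_map_range, hb, hs]
      have e1 : (List.range (K + 1)).map (fun i => if i = c + 1 then pvB ps (c + 1) (m + 1) else if i ≤ c then pvB ps i (m + 1) else pvB ps i m)
          = (List.range (K + 1)).map (fun t => if t ≤ c + 1 then pvB ps t (m + 1) else pvB ps t m) := by
        apply map_range_congr
        intro i hi
        rcases eq_or_ne i (c + 1) with h | h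
        · subst h; simp
        · by_cases h' : i ≤ c <;> simp [h, h', show (i ≤ c + 1) ↔ (i ≤ c) by omega]
      have e2 : (List.range (K + 1)).map (fun i => if i = c + 1 then pvS ps (c + 1) (m + 1) else if i ≤ c then pvS ps i (m + 1) else pvS ps i m)
          = (List.range (K + 1)).map (fun t => if t ≤ c + 1 then pvS ps t (m + 1) else pvS ps t m) := by
        apply map_range_congr
        intro i hi
        rcases eq_or_ne i (c + 1) with h | h
        · subst h; simp
        · by_cases h' : i ≤ c <;> simp [h, h', show (i ≤ c + 1) ↔ (i ≤ c) by omega]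
      rw [e1, e2]
      exact ih (c + 1) (by omega)

lemma stepB_col (ps : List Int) (K m : Nat) :
    pvStepB K (pvColB ps K m, pvColS ps K m) (ps.getD m 0) = (pvColB ps K (m + 1), pvColS ps K (m + 1)) := by
  unfold pvStepB
  have h0 : pvColB ps K m = (List.range (K + 1)).map (fun t => if t ≤ 0 then pvB ps t (m + 1) else pvB ps t m) := by
    apply map_range_congr
    intro i hi
    rcases Nat.eq_zero_or_pos i with h | h
    · subst h; simp
    · simp [show ¬ (i ≤ 0) by omega]
  have h0' : pvColS ps K m = (List.range (K + 1)).map (fun t => if t ≤ 0 then pvS ps t (m + 1) else pvS ps t m) := by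
    apply map_range_congr
    intro i hi
    rcases Nat.eq_zero_or_pos i with h | h
    · subst h; simp
    · simp [show ¬ (i ≤ 0) by omega]
  rw [h0, h0']
  have hmain := stepB_inner ps K m K 0 (by omega)
  simp only [Nat.zero_add] at hmain
  exact hmain

lemma foldB (ps : List Int) (K : Nat) :
    ∀ (suf pre : List Int), ps = pre ++ suf →
      suf.foldl (pvStepB K) (pvColB ps K pre.length, pvColS ps K pre.length)
        = (pvColB ps K ps.length, pvColS ps K ps.length) := by
  intro suf
  induction suf with
  | nil =>
      intro pre h
      simp [h]
  | cons x rest ih =>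
      intro pre h
      rw [List.foldl_cons]
      have hx : ps.getD pre.length 0 = x := by
        rw [h]
        rw [List.getD_eq_getElem?_getD, List.getElem?_append_right (Nat.le_refl _)]
        simp
      rw [← hx, stepB_col]
      have := ih (pre ++ [x]) (by simp [h])
      simpa using this

lemma alt_eq_pvS (prices : List Int) (k : Int) :
    maxProfitWithKTransactions2_alt prices k = pvS prices k.toNat prices.length := by
  have hB : List.replicate (k.toNat + 1) (none : Option Int) = pvColB prices k.toNat 0 := by
    unfold pvColB
    apply List.ext_getElem <;> simp
  have hS : List.replicate (k.toNat + 1) (0 : Int) = pvColS prices k.toNat 0 := by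
    unfold pvColS
    apply List.ext_getElem <;> simp
  have hF := foldB prices k.toNat prices [] (by simp)
  simp only [List.length_nil] at hF
  simp only [maxProfitWithKTransactions2_alt]
  rw [hB, hS, hF]
  unfold pvColS
  exact PySem.List.getD_map_range _ _ _ _ (by omega)

-- ==== A side ====

def pvRowVec (ps : List Int) (i : Nat) : List Int := (List.range ps.length).map (fun j => pvS ps i (j + 1))

lemma rowA_inner (ps : List Int) (i : Nat) :
    ∀ d c, c + d = ps.length - 1 →
      (List.range' (c + 1) d).foldl
        (fun (st : List Int × Option Int) j =>
          let pm := pvOMax st.2 ((pvRowVec ps i).getD (j - 1) 0 - ps.getD (j - 1) 0)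
          let v := max (max (st.1.getD (j - 1) 0) ((pvRowVec ps i).getD j 0)) (ps.getD j 0 + pm)
          (st.1.set j v, some pm))
        ((List.range ps.length).map (fun j => if j ≤ c then pvS ps (i + 1) (j + 1) else 0),
         pvB ps (i + 1) c)
      = ((List.range ps.length).map (fun j => if j ≤ ps.length - 1 then pvS ps (i + 1) (j + 1) else 0),
         pvB ps (i + 1) (ps.length - 1)) := by
  intro d
  induction d with
  | zero =>
      intro c hc
      have : c = ps.length - 1 := by omega
      subst this
      simp
  | succ d ih =>
      intro c hc
      rw [List.range'_succ, List.foldl_cons]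
      have hcn : c + 1 < ps.length := by omega
      have hcn' : c < ps.length := by omega
      have h1 : ((List.range ps.length).map (fun j => if j ≤ c then pvS ps (i + 1) (j + 1) else 0)).getD c 0
          = pvS ps (i + 1) (c + 1) := by
        rw [PySem.List.getD_map_range _ _ _ _ hcn']
        simp
      have h2 : (pvRowVec ps i).getD c 0 = pvS ps i (c + 1) := by
        unfold pvRowVec
        rw [PySem.List.getD_map_range _ _ _ _ hcn']
      have h3 : (pvRowVec ps i).getD (c + 1) 0 = pvS ps i (c + 1 + 1) := by
        unfold pvRowVec
        rw [PySem.List.getD_map_range _ _ _ _ hcn]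
      simp only [Nat.add_sub_cancel, h1, h2, h3]
      have hb : some (pvOMax (pvB ps (i + 1) c) (pvS ps i (c + 1) - ps.getD c 0)) = pvB ps (i + 1) (c + 1) := by
        rw [pvB]
      have hv : max (max (pvS ps (i + 1) (c + 1)) (pvS ps i (c + 1 + 1)))
            (ps.getD (c + 1) 0 + pvOMax (pvB ps (i + 1) c) (pvS ps i (c + 1) - ps.getD c 0))
          = pvS ps (i + 1) (c + 1 + 1) := by
        rw [pvS_step ps i c _ hb.symm]
      rw [hv, hb, set_map_range]
      have e1 : (List.range ps.length).map (fun j => if j = c + 1 then pvS ps (i + 1) (c + 1 + 1) else if j ≤ c then pvS ps (i + 1) (j + 1) else 0)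
          = (List.range ps.length).map (fun j => if j ≤ c + 1 then pvS ps (i + 1) (j + 1) else 0) := by
        apply map_range_congr
        intro j hj
        rcases eq_or_ne j (c + 1) with h | h
        · subst h; simp
        · by_cases h' : j ≤ c <;> simp [h, h', show (j ≤ c + 1) ↔ (j ≤ c) by omega]
      rw [e1]
      exact ih (c + 1) (by omega)

lemma rowA_vec (ps : List Int) (i : Nat) (hn : 1 ≤ ps.length) :
    pvRowA ps (pvRowVec ps i) = pvRowVec ps (i + 1) := by
  unfold pvRowA
  have h0 : ps.map (fun _ => (0 : Int)) = (List.range ps.length).map (fun j => if j ≤ 0 then pvS ps (i + 1) (j + 1) else 0) := by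
    apply List.ext_getElem
    · simp
    · intro j h1 h2
      simp only [List.getElem_map, List.getElem_range]
      rcases Nat.eq_zero_or_pos j with h | h
      · subst h; simp [pvS_one]
      · simp [show ¬ (j ≤ 0) by omega]
  have hpm : (none : Option Int) = pvB ps (i + 1) 0 := by simp
  rw [h0, hpm]
  have hmain := rowA_inner ps i (ps.length - 1) 0 (by omega)
  simp only [Nat.zero_add] at hmain
  rw [hmain]
  unfold pvRowVec
  apply map_range_congr
  intro j hj
  simp [show j ≤ ps.length - 1 by omega]

lemma outerA (ps : List Int) (hn : 1 ≤ ps.length) :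
    ∀ K : Nat, (List.range K).foldl (fun previous _ => pvRowA ps previous) (ps.map (fun _ => (0 : Int)))
      = pvRowVec ps K := by
  intro K
  induction K with
  | zero =>
      unfold pvRowVec
      simp only [List.range_zero, List.foldl_nil]
      apply List.ext_getElem
      · simp
      · intro j h1 h2
        simp
  | succ K ih =>
      rw [List.range_succ, List.foldl_append, ih]
      simp only [List.foldl_cons, List.foldl_nil]
      exact rowA_vec ps K hn

lemma getLastD_pvRowVec (ps : List Int) (K : Nat) (hn : 1 ≤ ps.length) :
    (pvRowVec ps K).getLastD 0 = pvS ps K ps.length := by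
  unfold pvRowVec
  rw [show ps.length = (ps.length - 1) + 1 by omega, List.range_succ, List.map_append]
  simp [show (ps.length - 1) + 1 = ps.length by omega]

lemma a_eq_pvS (prices : List Int) (k : Int) (h0 : 0 ≤ k) :
    maxProfitWithKTransactions2 prices k = pvS prices k.toNat prices.length := by
  unfold maxProfitWithKTransactions2
  split_ifs with h
  · rcases h with h | h
    · rw [h]; simp
    · rw [h]; simp
  · rcases not_or.mp h with ⟨h1, h2⟩
    have hn : 1 ≤ prices.length := by omega
    rw [outerA prices hn k.toNat, getLastD_pvRowVec prices k.toNat hn]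

-- ===== VERDICT (by name: the statement is the Claim_ definition above) =====
theorem maxProfitWithKTransactions2_spec : Claim_equal_maxProfitWithKTransactions2 := by
  intro prices k _ hpre
  unfold Spec_maxProfitWithKTransactions2
  rw [alt_eq_pvS, a_eq_pvS prices k hpre]
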